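-- pv_equiv track=rewrite | github.com/delandcaglar/udentify | bot_udentify/request1.py | max_number_array
-- ===== SOURCE A (Python) =====
-- def max_number_array(num):
--     max_sayi = float ( 0 )
--     max_sayi_zaman = ""
--     for t in num:
--         if max_sayi <= t[1]:
--             max_sayi = t[1]
--             max_sayi_zaman = t[0]
--     return max_sayi_zaman
-- ===== SOURCE B (Python) =====
-- def max_number_array(num):
--     m = max([0.0] + [t[1] for t in num])
--     label = ""
--     for t in num:
--         if t[1] == m:
--             label = t[0]
--     return label
-- ===== Notes on version B (the rewrite author's own statement) =====
-- stated objective: alternative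
-- what changed: Replaces the single running-max scan with two passes: compute the maximum value (floored at 0) first, then take the label of the last tuple attaining it.
import Mathlib
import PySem

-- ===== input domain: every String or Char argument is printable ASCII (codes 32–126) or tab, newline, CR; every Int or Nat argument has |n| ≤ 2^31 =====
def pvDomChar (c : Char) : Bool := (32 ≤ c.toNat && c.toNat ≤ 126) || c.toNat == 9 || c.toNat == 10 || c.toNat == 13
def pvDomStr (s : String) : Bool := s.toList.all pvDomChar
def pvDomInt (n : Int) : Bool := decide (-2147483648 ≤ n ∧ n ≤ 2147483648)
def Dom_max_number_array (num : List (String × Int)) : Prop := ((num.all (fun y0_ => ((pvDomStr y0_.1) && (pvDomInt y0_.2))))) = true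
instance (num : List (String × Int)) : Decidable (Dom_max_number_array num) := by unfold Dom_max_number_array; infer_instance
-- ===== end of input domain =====

-- B replaces A's single running-max scan by two passes: first the max value floored at 0,
-- then the label of the last tuple attaining it (objective: alternative decomposition).

-- ===== PORT A =====
-- running-max scan; state = (max_sayi, max_sayi_zaman)
def max_number_array (num : List (String × Int)) : String :=
  (num.foldl (fun (st : Int × String) t => if st.1 ≤ t.2 then (t.2, t.1) else st) (0, "")).2

-- ===== PORT B =====
-- pass 1: m = max([0] ++ values)  (Python's max scans left to right)
def pvMaxVal (num : List (String × Int)) : Int :=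
  num.foldl (fun a t => max a t.2) 0

-- pass 2: label of the last tuple whose value equals m, default ""
def max_number_array_alt (num : List (String × Int)) : String :=
  let m := pvMaxVal num
  num.foldl (fun lab t => if t.2 = m then t.1 else lab) ""

-- ===== PRECONDITION & SPEC =====
def Spec_max_number_array (num : List (String × Int)) (out : String) : Prop := out = max_number_array_alt num
instance (num : List (String × Int)) (out : String) : Decidable (Spec_max_number_array num out) := by unfold Spec_max_number_array; infer_instance

-- ===== CLAIM (what is proved, stated in full; the proofs are below) =====
def Claim_equal_max_number_array : Prop := ∀ (num : List (String × Int)), Dom_max_number_array num → Spec_max_number_array num (max_number_array num)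

-- ===== LEMMAS AND PROOFS =====

-- A's fold state is exactly (max floored at 0, last label attaining it); proved from the right.
theorem pv_state_eq (num : List (String × Int)) :
    num.foldl (fun (st : Int × String) t => if st.1 ≤ t.2 then (t.2, t.1) else st) (0, "")
      = (pvMaxVal num,
         num.foldl (fun lab t => if t.2 = pvMaxVal num then t.1 else lab) "") := by
  induction num using List.reverseRecOn with
  | nil => simp [pvMaxVal]
  | append_singleton xs t ih =>
    have hmax : pvMaxVal (xs ++ [t]) = max (pvMaxVal xs) t.2 := by
      simp [pvMaxVal]
    by_cases h : pvMaxVal xs ≤ t.2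
    · have hm : pvMaxVal (xs ++ [t]) = t.2 := by rw [hmax]; omega
      simp only [List.foldl_append, List.foldl_cons, List.foldl_nil, ih, hm]
      simp [h]
    · have hm : pvMaxVal (xs ++ [t]) = pvMaxVal xs := by rw [hmax]; omega
      have hne : t.2 ≠ pvMaxVal xs := by omega
      simp only [List.foldl_append, List.foldl_cons, List.foldl_nil, ih, hm]
      simp [h, hne]

-- ===== VERDICT (by name: the statement is the Claim_ definition above) =====
theorem max_number_array_spec : Claim_equal_max_number_array := by
  intro num _
  unfold Spec_max_number_array max_number_array max_number_array_alt
  rw [pv_state_eq]
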